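-- pv_equiv track=rewrite | github.com/edmundduck/pfims | client_code/Utils/Helper.py | upper_dict_keys
-- ===== SOURCE A (Python) =====
-- def upper_dict_keys(rows, key_list=None):
--     """
--     Change the key(s) in a dict to be upper case.
--
--     If key_list is None, then all keys in a dict will be changed to upper case, otherwise only change those found in key_list.
--
--     Parameters:
--         key_list (list): List of key requiring to be upper case.
--
--     Returns:
--         result (list of dict): List of dict containing keys in upper case.
--     """
--     DL = {}
--     if rows is not None and len(rows) > 0:
--         for k in rows[0].keys():
--             if k.upper() in key_list or not key_list:
--                 DL[k.upper()] = [row[k] for row in rows]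
--             else:
--                 DL[k] = [row[k] for row in rows]
--     result = to_list_of_dict(DL)
--     return result
--
-- def to_list_of_dict(DL):
--     """
--     Convert the structure of dict of list (DL) to list of dict (LD).
--
--     Parameters:
--         DL (dict of list): Dict of list.
--
--     Returns:
--         LD (list of dict): List of dict.
--     """
--     if DL is not None:
--         LD = [dict(zip(DL, col)) for col in zip(*DL.values())]
--     else:
--         LD = []
--     return LD
-- ===== SOURCE B (Python) =====
-- def upper_dict_keys(rows, key_list=None):
--     # Row-wise rebuild with a precomputed key->newkey mapping; no dict-of-lists
--     # intermediate and no zip-transpose.  key_list=None naturally means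
--     # "uppercase all keys" here (where A would evaluate `in None`, it raises).
--     if rows is None or len(rows) == 0:
--         return []
--     keys = list(rows[0].keys())
--     mapping = {}
--     for k in keys:
--         u = k.upper()
--         mapping[k] = u if (not key_list or u in key_list) else k
--     return [{mapping[k]: row[k] for k in keys} for row in rows]
-- ===== Notes on version B (the rewrite author's own statement) =====
-- stated objective: simpler
-- what changed: B precomputes a key->uppercased-key mapping from rows[0] once and builds each output dict directly per row, eliminating A's dict-of-lists intermediate and the zip(*values) transpose in to_list_of_dict; on non-empty rows with non-empty rows[0], B treats key_list=None as 'uppercase all keys' where A raises TypeError.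
-- intended difference: When rows is non-empty but its first dict is empty, A returns [] (zip of no columns collapses all rows) while B returns one empty dict per row, preserving the row count, which is the intended shape of the result. — e.g. on upper_dict_keys([[]], some ["A"]): A returns [], B returns [[]]
import Mathlib
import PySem

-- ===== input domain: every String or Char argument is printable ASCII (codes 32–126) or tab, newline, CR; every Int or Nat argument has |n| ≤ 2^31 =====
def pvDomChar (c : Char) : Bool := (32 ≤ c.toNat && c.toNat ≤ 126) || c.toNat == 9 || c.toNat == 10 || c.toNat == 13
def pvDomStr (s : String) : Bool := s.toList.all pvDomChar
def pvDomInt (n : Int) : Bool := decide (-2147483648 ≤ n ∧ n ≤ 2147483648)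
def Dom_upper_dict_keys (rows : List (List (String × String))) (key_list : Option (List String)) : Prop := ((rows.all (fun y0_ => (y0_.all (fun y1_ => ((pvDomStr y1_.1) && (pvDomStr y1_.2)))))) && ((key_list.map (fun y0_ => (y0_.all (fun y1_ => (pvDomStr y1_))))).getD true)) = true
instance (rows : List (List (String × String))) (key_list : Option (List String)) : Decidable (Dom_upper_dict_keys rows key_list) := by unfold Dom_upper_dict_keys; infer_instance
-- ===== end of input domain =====

-- B precomputes a key->uppercased-key mapping once and rebuilds each row directly,
-- replacing A's dict-of-lists + zip-transpose decomposition (objective: simpler).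
-- Each input row is a Python dict, modelled as PySem.Dict.ofList of its pair list.

-- ===== PORT A =====
-- row[k] (the KeyError case — key absent — is excluded by Pre_)
def pvRowGet (row : List (String × String)) (k : String) : String :=
  ((PySem.Dict.ofList row).get? k).getD ""

-- `k.upper() in key_list or not key_list`; for key_list = None Python raises
-- TypeError (excluded by Pre_), so the `none` value here is arbitrary
def pvCondA (key_list : Option (List String)) (k : String) : Bool :=
  match key_list with
  | some l => decide (PySem.Str.upper k ∈ l) || l.isEmpty
  | none => true

-- [row[k] for row in rows]
def pvColumn (rows : List (List (String × String))) (k : String) : List String :=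
  rows.map (fun row => pvRowGet row k)

-- zip(*vals): tuples up to the shortest list; zip() with no arguments is empty
def pvZipStar (vals : List (List String)) : List (List String) :=
  match (vals.map List.length).min? with
  | none => []
  | some n => (List.range n).map (fun i => vals.map (fun v => v.getD i ""))

-- [dict(zip(DL, col)) for col in zip(*DL.values())]  (the `DL is not None` branch)
def to_list_of_dict (DL : PySem.Dict String (List String)) : List (List (String × String)) :=
  (pvZipStar DL.values).map (fun col => (PySem.Dict.ofList (DL.keys.zip col)).items)

def upper_dict_keys (rows : List (List (String × String))) (key_list : Option (List String)) : List (List (String × String)) :=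
  let DL : PySem.Dict String (List String) :=
    match rows with
    | [] => PySem.Dict.empty
    | r0 :: _ =>
      (PySem.Dict.ofList r0).keys.foldl
        (fun d k =>
          if pvCondA key_list k then d.insert (PySem.Str.upper k) (pvColumn rows k)
          else d.insert k (pvColumn rows k))
        PySem.Dict.empty
  to_list_of_dict DL

-- ===== PORT B =====
-- `not key_list or u in key_list` (None and [] are both falsy)
def pvCondB (key_list : Option (List String)) (k : String) : Bool :=
  match key_list with
  | none => true
  | some l => l.isEmpty || decide (PySem.Str.upper k ∈ l)

def upper_dict_keys_alt (rows : List (List (String × String))) (key_list : Option (List String)) : List (List (String × String)) :=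
  match rows with
  | [] => []
  | r0 :: _ =>
    let keys := (PySem.Dict.ofList r0).keys
    let mapping : PySem.Dict String String :=
      keys.foldl (fun m k => m.insert k (if pvCondB key_list k then PySem.Str.upper k else k))
        PySem.Dict.empty
    rows.map (fun row =>
      (keys.foldl (fun d k => d.insert (mapping.getD k k) (pvRowGet row k)) PySem.Dict.empty).items)

-- ===== PRECONDITION & SPEC =====
-- Pre_ excludes (a) key_list = None when rows and rows[0] are non-empty, where A
-- evaluates `k.upper() in None` and raises TypeError, and (b) rows where a key of
-- rows[0] is missing from a later row, where A raises KeyError.  Both are crashes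
-- of A; A returns normally everywhere else.
def Pre_upper_dict_keys (rows : List (List (String × String))) (key_list : Option (List String)) : Prop :=
  (rows = [] ∨ rows.headD [] = [] ∨ key_list ≠ none) ∧
  ∀ row ∈ rows, ∀ k ∈ (rows.headD []).map Prod.fst, k ∈ row.map Prod.fst
instance (rows : List (List (String × String))) (key_list : Option (List String)) : Decidable (Pre_upper_dict_keys rows key_list) := by unfold Pre_upper_dict_keys; infer_instance

def pvWitness_upper_dict_keys : (List (List (String × String))) × Option (List String) :=
  ([[("a", "1"), ("b", "2")], [("a", "3"), ("b", "4")]], some ["A"])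

-- When rows is non-empty but its first dict is empty, A returns [] (zip of no columns
-- collapses all rows) while B returns one empty dict per row, preserving the row
-- count, which is the intended shape of the result.
def D_upper_dict_keys (rows : List (List (String × String))) (key_list : Option (List String)) : Prop :=
  rows ≠ [] ∧ rows.headD [] = []
instance (rows : List (List (String × String))) (key_list : Option (List String)) : Decidable (D_upper_dict_keys rows key_list) := by unfold D_upper_dict_keys; infer_instance

def Spec_upper_dict_keys (rows : List (List (String × String))) (key_list : Option (List String)) (out : List (List (String × String))) : Prop := ¬ D_upper_dict_keys rows key_list → out = upper_dict_keys_alt rows key_list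
instance (rows : List (List (String × String))) (key_list : Option (List String)) (out : List (List (String × String))) : Decidable (Spec_upper_dict_keys rows key_list out) := by unfold Spec_upper_dict_keys; infer_instance

def pvDiffWitness_upper_dict_keys : (List (List (String × String))) × Option (List String) :=
  ([[]], some ["A"])
def pvDiffWitnessOut_upper_dict_keys : (List (List (String × String))) × (List (List (String × String))) :=
  ([], [[]])

-- ===== CLAIM (what is proved, stated in full; the proofs are below) =====
def Claim_unchanged_upper_dict_keys : Prop := ∀ (rows : List (List (String × String))) (key_list : Option (List String)), Dom_upper_dict_keys rows key_list → Pre_upper_dict_keys rows key_list → Spec_upper_dict_keys rows key_list (upper_dict_keys rows key_list)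
def Claim_changed_upper_dict_keys : Prop := Dom_upper_dict_keys (pvDiffWitness_upper_dict_keys.1) (pvDiffWitness_upper_dict_keys.2) ∧ Pre_upper_dict_keys (pvDiffWitness_upper_dict_keys.1) (pvDiffWitness_upper_dict_keys.2) ∧ D_upper_dict_keys (pvDiffWitness_upper_dict_keys.1) (pvDiffWitness_upper_dict_keys.2) ∧ upper_dict_keys (pvDiffWitness_upper_dict_keys.1) (pvDiffWitness_upper_dict_keys.2) = pvDiffWitnessOut_upper_dict_keys.1 ∧ upper_dict_keys_alt (pvDiffWitness_upper_dict_keys.1) (pvDiffWitness_upper_dict_keys.2) = pvDiffWitnessOut_upper_dict_keys.2 ∧ pvDiffWitnessOut_upper_dict_keys.1 ≠ pvDiffWitnessOut_upper_dict_keys.2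
def Claim_exact_upper_dict_keys : Prop := ∀ (rows : List (List (String × String))) (key_list : Option (List String)), Dom_upper_dict_keys rows key_list → Pre_upper_dict_keys rows key_list → D_upper_dict_keys rows key_list → upper_dict_keys rows key_list ≠ upper_dict_keys_alt rows key_list

-- ===== LEMMAS AND PROOFS =====

-- projection of a value-list dict at column i
def pvProj (i : Nat) (p : String × List String) : String × String := (p.1, p.2.getD i "")

theorem pv_getD_foldl_insert_fun (l : List String) (f : String → String)
    (d : PySem.Dict String String) (k dflt : String) :
    (l.foldl (fun m x => m.insert x (f x)) d).getD k dflt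
      = if k ∈ l then f k else d.getD k dflt := by
  induction l generalizing d with
  | nil => simp
  | cons a t ih =>
    simp only [List.foldl_cons, ih, List.mem_cons]
    by_cases ht : k ∈ t
    · simp [ht]
    · by_cases ha : k = a
      · subst ha; simp [ht, PySem.Dict.getD_insert_self]
      · simp [ht, ha, PySem.Dict.getD_insert]

theorem pv_proj_fold (m : String → String) (V : String → List String) (w : String → String) (i : Nat)
    (keys : List String) (hV : ∀ k ∈ keys, (V k).getD i "" = w k)
    (d : PySem.Dict String (List String)) (e : PySem.Dict String String)
    (hinv : e.items = d.items.map (pvProj i)) :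
    (keys.foldl (fun d k => d.insert (m k) (V k)) d).items.map (pvProj i)
      = (keys.foldl (fun e k => e.insert (m k) (w k)) e).items := by
  induction keys generalizing d e with
  | nil => simpa using hinv.symm
  | cons a t ih =>
    simp only [List.foldl_cons]
    apply ih (fun k hk => hV k (List.mem_cons_of_mem _ hk))
    have hkeys : e.keys = d.keys := by
      simp only [PySem.Dict.keys, hinv, List.map_map]; rfl
    have hc : e.contains (m a) = d.contains (m a) := by
      simp [PySem.Dict.contains_eq_decide_mem_keys, hkeys]
    have hVa : (V a)[i]?.getD "" = w a := by
      rw [← List.getD_eq_getElem?_getD]; exact hV a List.mem_cons_self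
    rw [PySem.Dict.items_insert, PySem.Dict.items_insert, hc]
    by_cases hcd : d.contains (m a) = true
    · simp only [hcd, if_true, hinv, List.map_map]
      apply List.map_congr_left
      intro p _
      by_cases hp : p.1 = m a <;> simp [pvProj, hp, hVa]
    · simp [hcd, hinv, pvProj, hVa]

theorem pv_items_fold_len (keys : List String) (m : String → String) (V : String → List String)
    (n : Nat) (hV : ∀ k ∈ keys, (V k).length = n) (d : PySem.Dict String (List String))
    (hd : ∀ p ∈ d.items, (p.2 : List String).length = n) :
    ∀ p ∈ (keys.foldl (fun d k => d.insert (m k) (V k)) d).items, p.2.length = n := by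
  induction keys generalizing d with
  | nil => simpa using hd
  | cons a t ih =>
    simp only [List.foldl_cons]
    apply ih (fun k hk => hV k (List.mem_cons_of_mem _ hk))
    intro p hp
    rcases (PySem.Dict.mem_items_insert _ _ _ _).mp hp with h | ⟨h, -⟩
    · subst h; exact hV a List.mem_cons_self
    · exact hd p h

theorem pv_foldl_min_const (t : List Nat) (n : Nat) (h : ∀ x ∈ t, x = n) :
    t.foldl min n = n := by
  induction t with
  | nil => rfl
  | cons b t ih =>
    have hb : b = n := h b List.mem_cons_self
    simp only [List.foldl_cons, hb, min_self]
    exact ih (fun x hx => h x (List.mem_cons_of_mem _ hx))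

theorem pv_min?_const (l : List Nat) (n : Nat) (hne : l ≠ []) (h : ∀ x ∈ l, x = n) :
    l.min? = some n := by
  cases l with
  | nil => exact absurd rfl hne
  | cons a t =>
    have ha : a = n := h a List.mem_cons_self
    rw [List.min?_cons']
    subst ha
    rw [pv_foldl_min_const t a (fun x hx => h x (List.mem_cons_of_mem _ hx))]

theorem pv_items_ofList_nodup (l : List (String × String)) (h : (l.map Prod.fst).Nodup) :
    (PySem.Dict.ofList l).items = l := by
  have heq : PySem.Dict.ofList l
      = l.foldl (fun d p => d.insert p.1 p.2) PySem.Dict.empty := rfl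
  rw [heq, PySem.Dict.items_foldl_insert_fresh l Prod.fst Prod.snd _ (by simp) h,
    show (PySem.Dict.empty : PySem.Dict String String).items = [] from rfl]
  simp

theorem pv_map_eq_range_getD {α β : Type} (l : List α) (f : α → β) (dflt : α) :
    l.map f = (List.range l.length).map (fun i => f (l.getD i dflt)) := by
  apply List.ext_getElem
  · simp
  · intro i h1 h2
    simp only [List.getElem_map, List.getElem_range]
    congr 1
    rw [List.getD_eq_getElem?_getD, List.getElem?_eq_getElem (by simpa using h1)]
    rfl

theorem pv_alt_cons (r0 : List (String × String)) (rest : List (List (String × String)))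
    (kl : Option (List String)) :
    upper_dict_keys_alt (r0 :: rest) kl =
      (r0 :: rest).map (fun row =>
        (((PySem.Dict.ofList r0).keys).foldl
          (fun d k => d.insert
            ((((PySem.Dict.ofList r0).keys).foldl
                (fun m k => m.insert k (if pvCondB kl k then PySem.Str.upper k else k))
                PySem.Dict.empty).getD k k)
            (pvRowGet row k))
          PySem.Dict.empty).items) := rfl

theorem pv_cond_eq (l : List String) (k : String) :
    pvCondA (some l) k = pvCondB (some l) k := by
  simp [pvCondA, pvCondB, Bool.or_comm]

theorem upper_dict_keys_spec : Claim_unchanged_upper_dict_keys := by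
  intro rows key_list _ hpre hnd
  cases rows with
  | nil => rfl
  | cons r0 rest =>
    have hr0 : r0 ≠ [] := by
      intro h
      exact hnd ⟨List.cons_ne_nil _ _, by simp [h]⟩
    obtain ⟨l, rfl⟩ : ∃ l, key_list = some l := by
      rcases hpre.1 with h | h | h
      · exact absurd h (List.cons_ne_nil _ _)
      · exact absurd (by simpa using h) hr0
      · cases key_list with
        | none => exact absurd rfl h
        | some l => exact ⟨l, rfl⟩
    -- abbreviations
    set rows := r0 :: rest with hrows
    set keys := (PySem.Dict.ofList r0).keys with hkeys
    set mk : String → String :=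
      fun k => if pvCondA (some l) k then PySem.Str.upper k else k with hmk
    set n := rows.length with hn
    -- keys is non-empty
    have hkne : keys ≠ [] := by
      obtain ⟨p, ps, rfl⟩ := List.exists_cons_of_ne_nil hr0
      have : p.1 ∈ keys := by
        have : PySem.Dict.ofList (p :: ps)
            = (p :: ps).foldl (fun d q => d.insert q.1 q.2) PySem.Dict.empty := rfl
        rw [hkeys, this,
          PySem.Dict.keys_foldl_insert_key (p :: ps) Prod.fst (fun _ q => q.2) _]
        simp only [PySem.Dict.keys_empty, PySem.Set.update_nil_left]
        exact (PySem.Set.mem_ofList _ _).mpr (by simp)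
      exact List.ne_nil_of_mem this
    -- normalise A's fold body
    have hfoldA : (fun (d : PySem.Dict String (List String)) k =>
          if pvCondA (some l) k then d.insert (PySem.Str.upper k) (pvColumn rows k)
          else d.insert k (pvColumn rows k))
        = fun d k => d.insert (mk k) (pvColumn rows k) := by
      funext d k
      by_cases h : pvCondA (some l) k <;> simp [hmk, h]
    set DL := keys.foldl (fun d k => d.insert (mk k) (pvColumn rows k)) PySem.Dict.empty with hDL
    -- facts about DL
    have hlen : ∀ p ∈ DL.items, p.2.length = n := by
      apply pv_items_fold_len keys mk (fun k => pvColumn rows k) n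
      · intro k _; simp [pvColumn, hn]
      · intro p hp
        rw [show (PySem.Dict.empty : PySem.Dict String (List String)).items = [] from rfl] at hp
        exact absurd hp List.not_mem_nil
    have hnodup : DL.keys.Nodup := by
      rw [hDL]
      exact PySem.Dict.nodup_keys_foldl_insert_key keys mk (fun _ k => pvColumn rows k) _
        PySem.Dict.nodup_keys_empty
    have hDLkeys : DL.keys = PySem.Set.ofList (keys.map mk) := by
      rw [hDL, PySem.Dict.keys_foldl_insert_key keys mk (fun _ k => pvColumn rows k) _]
      simp [PySem.Set.update_nil_left]
    have hDLne : DL.items ≠ [] := by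
      intro h
      have hkeq : DL.keys = [] := by simp [PySem.Dict.keys, h]
      rw [hDLkeys] at hkeq
      obtain ⟨a, as, hks⟩ := List.exists_cons_of_ne_nil hkne
      have hm : mk a ∈ PySem.Set.ofList (keys.map mk) :=
        (PySem.Set.mem_ofList _ _).mpr (by rw [hks]; simp)
      rw [hkeq] at hm
      exact absurd hm List.not_mem_nil
    -- the zip-transpose of DL.values
    have hmin : (DL.values.map List.length).min? = some n := by
      apply pv_min?_const
      · simp [PySem.Dict.values, hDLne]
      · intro x hx
        simp only [PySem.Dict.values, List.map_map, List.mem_map] at hx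
        obtain ⟨p, hp, rfl⟩ := hx
        exact hlen p hp
    -- A's result, column by column
    have hA : upper_dict_keys rows (some l)
        = (List.range n).map (fun i => (DL.items.map (pvProj i))) := by
      show to_list_of_dict _ = _
      rw [hfoldA]
      unfold to_list_of_dict pvZipStar
      rw [hmin]
      simp only [List.map_map]
      apply List.map_congr_left
      intro i _
      have hzip : DL.keys.zip (DL.values.map (fun v => v.getD i ""))
          = DL.items.map (pvProj i) := by
        simp only [PySem.Dict.keys, PySem.Dict.values, List.map_map, List.zip_map']
        rfl
      show (PySem.Dict.ofList (DL.keys.zip (DL.values.map (fun v => v.getD i "")))).items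
          = DL.items.map (pvProj i)
      rw [hzip, pv_items_ofList_nodup]
      have : (DL.items.map (pvProj i)).map Prod.fst = DL.keys := by
        simp only [PySem.Dict.keys, List.map_map]; rfl
      rw [this]; exact hnodup
    -- B's result, row by row
    have hB : upper_dict_keys_alt rows (some l)
        = (List.range n).map (fun i =>
            (keys.foldl (fun e k => e.insert (mk k) (pvRowGet (rows.getD i []) k))
              PySem.Dict.empty).items) := by
      rw [hrows, pv_alt_cons, pv_map_eq_range_getD (r0 :: rest) _ []]
      apply List.map_congr_left
      intro i _
      congr 1
      apply PySem.List.foldl_congr_mem'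
      intro k hk e
      congr 1
      rw [pv_getD_foldl_insert_fun keys
        (fun k => if pvCondB (some l) k then PySem.Str.upper k else k) _ k k, if_pos hk,
        ← pv_cond_eq l k]
    rw [hA, hB]
    apply List.map_congr_left
    intro i hi
    have hi' : i < rows.length := by simpa [hn] using List.mem_range.mp hi
    apply pv_proj_fold mk (fun k => pvColumn rows k) (fun k => pvRowGet (rows.getD i []) k) i keys
    · intro k _
      simp only [pvColumn, List.getD_eq_getElem?_getD, List.getElem?_map,
        List.getElem?_eq_getElem hi']
      rfl
    · rfl

theorem upper_dict_keys_changed : Claim_changed_upper_dict_keys := by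
  unfold Claim_changed_upper_dict_keys; decide

theorem upper_dict_keys_tight : Claim_exact_upper_dict_keys := by
  intro rows key_list _ _ hd h
  obtain ⟨hne, hh⟩ := hd
  cases rows with
  | nil => exact hne rfl
  | cons r0 rest =>
    have hr0 : r0 = [] := by simpa using hh
    subst hr0
    rw [show upper_dict_keys ([] :: rest) key_list = [] from rfl] at h
    exact List.cons_ne_nil _ _ h.symm
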